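-- pv_equiv track=rewrite | github.com/serene4uto/autoparking_ros | autoparking_core/autoparking_core/pslot_status_detector.py | find_lowest_left_point
-- ===== SOURCE A (Python) =====
-- def find_lowest_left_point(points):
--     # The image pixel is reversed so the lowest point in real image is the pixel in highest position
--     lowest_left_point = None
--     lowest_y = float('-inf')  # Initialize with negative infinity to ensure any point will be higher
--
--     for x, y in points:
--         if y > lowest_y or (y == lowest_y and x < lowest_left_point[0]):
--             lowest_y = y
--             lowest_left_point = (x, y)
--
--     return lowest_left_point
-- ===== SOURCE B (Python) =====
-- def find_lowest_left_point(points):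
--     # Two-pass re-implementation: first find the maximal y, then the minimal x among
--     # the points attaining it. Same return value as the single-pass original.
--     max_y = None
--     for x, y in points:
--         if max_y is None or y > max_y:
--             max_y = y
--     if max_y is None:
--         return None
--     min_x = None
--     for x, y in points:
--         if y == max_y and (min_x is None or x < min_x):
--             min_x = x
--     return (min_x, max_y)
-- ===== Notes on version B (the rewrite author's own statement) =====
-- stated objective: alternative
-- what changed: Replaces A's single running-best fold (tracking the best point and a -inf-seeded lowest_y) with a two-pass decomposition: one pass computes the maximal y, a second pass computes the minimal x among points attaining it, and the pair is returned.
import Mathlib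
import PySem

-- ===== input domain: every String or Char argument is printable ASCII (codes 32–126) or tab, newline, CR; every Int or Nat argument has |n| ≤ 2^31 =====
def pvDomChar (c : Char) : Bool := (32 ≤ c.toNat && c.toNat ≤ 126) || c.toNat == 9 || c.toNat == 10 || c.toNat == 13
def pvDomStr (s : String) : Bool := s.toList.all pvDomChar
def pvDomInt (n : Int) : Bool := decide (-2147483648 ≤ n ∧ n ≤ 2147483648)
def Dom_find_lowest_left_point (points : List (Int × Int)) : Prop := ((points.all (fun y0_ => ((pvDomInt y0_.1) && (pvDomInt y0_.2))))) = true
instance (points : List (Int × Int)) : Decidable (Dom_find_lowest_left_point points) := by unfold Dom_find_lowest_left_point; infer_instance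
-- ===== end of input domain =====

-- B replaces A's single running-best fold by a two-pass decomposition (max y, then min x
-- among maximal-y points); objective: alternative decomposition, same O(n) cost.


-- ===== PORT A =====
-- loop state: `none` represents (lowest_left_point = None, lowest_y = -inf);
-- `y > -inf` holds for every Int y, so the None state always updates (exact on Int inputs,
-- and lowest_left_point[0] is only read when lowest_y is a real y, i.e. state is some).
def pvStepA (st : Option (Int × Int)) (p : Int × Int) : Option (Int × Int) :=
  match st with
  | none => some p
  | some b => if p.2 > b.2 ∨ (p.2 = b.2 ∧ p.1 < b.1) then some p else st

def find_lowest_left_point (points : List (Int × Int)) : Option (Int × Int) :=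
  points.foldl pvStepA none

-- ===== PORT B =====
-- first pass of Source B: running maximum of the y's (None while no point seen)
def pvStepMax (m : Option Int) (p : Int × Int) : Option Int :=
  match m with
  | none => some p.2
  | some v => if p.2 > v then some p.2 else m

-- second pass of Source B: running minimum of the x's whose y equals max_y
def pvStepMin (my : Int) (m : Option Int) (p : Int × Int) : Option Int :=
  if p.2 = my then
    match m with
    | none => some p.1
    | some v => if p.1 < v then some p.1 else m
  else m

def find_lowest_left_point_alt (points : List (Int × Int)) : Option (Int × Int) :=
  match points.foldl pvStepMax none with
  | none => none
  | some my =>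
    match points.foldl (pvStepMin my) none with
    | none => none   -- unreachable: the maximal y is attained by some point
    | some mx => some (mx, my)

-- ===== PRECONDITION & SPEC =====
def Spec_find_lowest_left_point (points : List (Int × Int)) (out : Option (Int × Int)) : Prop := out = find_lowest_left_point_alt points
instance (points : List (Int × Int)) (out : Option (Int × Int)) : Decidable (Spec_find_lowest_left_point points out) := by unfold Spec_find_lowest_left_point; infer_instance

-- ===== CLAIM (what is proved, stated in full; the proofs are below) =====
def Claim_equal_find_lowest_left_point : Prop := ∀ (points : List (Int × Int)), Dom_find_lowest_left_point points → Spec_find_lowest_left_point points (find_lowest_left_point points)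

-- ===== LEMMAS AND PROOFS =====

-- "r would replace s": r has strictly larger y, or equal y and strictly smaller x
def pvBeats (r s : Int × Int) : Prop := r.2 > s.2 ∨ (r.2 = s.2 ∧ r.1 < s.1)

lemma foldA_props : ∀ (l : List (Int × Int)) (b : Int × Int),
    ∃ q, l.foldl pvStepA (some b) = some q ∧ (q = b ∨ q ∈ l) ∧ ¬ pvBeats b q ∧ ∀ r ∈ l, ¬ pvBeats r q := by
  intro l
  induction l with
  | nil => intro b; exact ⟨b, rfl, Or.inl rfl, by simp [pvBeats], by simp⟩
  | cons p t ih =>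
    intro b
    by_cases hc : p.2 > b.2 ∨ (p.2 = b.2 ∧ p.1 < b.1)
    · obtain ⟨q, hq, hmem, hb, hall⟩ := ih p
      refine ⟨q, by simp [List.foldl_cons, pvStepA, hc, hq], ?_, ?_, ?_⟩
      · rcases hmem with h | h
        · exact Or.inr (h ▸ List.mem_cons_self)
        · exact Or.inr (List.mem_cons_of_mem _ h)
      · obtain ⟨bx, by'⟩ := b; obtain ⟨px, py⟩ := p; obtain ⟨qx, qy⟩ := q
        simp only [pvBeats] at *
        omega
      · intro r hr
        rcases List.mem_cons.mp hr with h | h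
        · exact h ▸ hb
        · exact hall r h
    · obtain ⟨q, hq, hmem, hb, hall⟩ := ih b
      refine ⟨q, by simp [List.foldl_cons, pvStepA, hc, hq], ?_, hb, ?_⟩
      · rcases hmem with h | h
        · exact Or.inl h
        · exact Or.inr (List.mem_cons_of_mem _ h)
      · intro r hr
        rcases List.mem_cons.mp hr with h | h
        · subst h
          obtain ⟨bx, by'⟩ := b; obtain ⟨rx, ry⟩ := r; obtain ⟨qx, qy⟩ := q
          simp only [pvBeats] at *
          omega
        · exact hall r h

lemma foldMax_props : ∀ (l : List (Int × Int)) (v : Int),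
    ∃ m, l.foldl pvStepMax (some v) = some m ∧ v ≤ m ∧ (m = v ∨ ∃ p ∈ l, p.2 = m) ∧ ∀ p ∈ l, p.2 ≤ m := by
  intro l
  induction l with
  | nil => intro v; exact ⟨v, rfl, le_refl _, Or.inl rfl, by simp⟩
  | cons p t ih =>
    intro v
    by_cases h : p.2 > v
    · obtain ⟨m, hm, hle, hmem, hall⟩ := ih p.2
      refine ⟨m, by simp [List.foldl_cons, pvStepMax, h, hm], by omega, ?_, ?_⟩
      · rcases hmem with h' | ⟨q, hq, hq2⟩
        · exact Or.inr ⟨p, List.mem_cons_self, h'.symm⟩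
        · exact Or.inr ⟨q, List.mem_cons_of_mem _ hq, hq2⟩
      · intro r hr
        rcases List.mem_cons.mp hr with h' | h'
        · subst h'; omega
        · exact hall r h'
    · obtain ⟨m, hm, hle, hmem, hall⟩ := ih v
      refine ⟨m, by simp [List.foldl_cons, pvStepMax, h, hm], hle, ?_, ?_⟩
      · rcases hmem with h' | ⟨q, hq, hq2⟩
        · exact Or.inl h'
        · exact Or.inr ⟨q, List.mem_cons_of_mem _ hq, hq2⟩
      · intro r hr
        rcases List.mem_cons.mp hr with h' | h'
        · subst h'; omega
        · exact hall r h'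

lemma foldMin_props : ∀ (l : List (Int × Int)) (my : Int) (acc : Option Int),
    match l.foldl (pvStepMin my) acc with
    | none => acc = none ∧ ∀ p ∈ l, p.2 ≠ my
    | some v => (acc = some v ∨ (v, my) ∈ l) ∧ (∀ w, acc = some w → v ≤ w) ∧
                ∀ p ∈ l, p.2 = my → v ≤ p.1 := by
  intro l
  induction l with
  | nil =>
    intro my acc
    cases acc with
    | none => simp
    | some v => simp
  | cons p t ih =>
    intro my acc
    obtain ⟨px, py⟩ := p
    rw [List.foldl_cons]
    by_cases hpy : py = my
    · -- the head matches max_y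
      cases acc with
      | none =>
        have hstep : pvStepMin my none (px, py) = some px := by simp [pvStepMin, hpy]
        rw [hstep]
        have H := ih my (some px)
        cases hres : t.foldl (pvStepMin my) (some px) with
        | none => rw [hres] at H; simp at H
        | some v =>
          rw [hres] at H
          obtain ⟨hm, hle, hall⟩ := H
          refine ⟨?_, by simp, ?_⟩
          · rcases hm with h | h
            · have : v = px := by simpa using h.symm
              subst this; subst hpy
              exact Or.inr List.mem_cons_self
            · exact Or.inr (List.mem_cons_of_mem _ h)
          · intro r hr hrmy
            rcases List.mem_cons.mp hr with h | h
            · have : v ≤ px := hle px rfl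
              subst h; simpa using this
            · exact hall r h hrmy
      | some w =>
        by_cases hlt : px < w
        · have hstep : pvStepMin my (some w) (px, py) = some px := by
            simp [pvStepMin, hpy, hlt]
          rw [hstep]
          have H := ih my (some px)
          cases hres : t.foldl (pvStepMin my) (some px) with
          | none => rw [hres] at H; simp at H
          | some v =>
            rw [hres] at H
            obtain ⟨hm, hle, hall⟩ := H
            have hvpx : v ≤ px := hle px rfl
            refine ⟨?_, ?_, ?_⟩
            · rcases hm with h | h
              · have : v = px := by simpa using h.symm
                subst this; subst hpy
                exact Or.inr List.mem_cons_self
              · exact Or.inr (List.mem_cons_of_mem _ h)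
            · intro w' hw'
              have : w = w' := by simpa using hw'
              omega
            · intro r hr hrmy
              rcases List.mem_cons.mp hr with h | h
              · subst h; simpa using hvpx
              · exact hall r h hrmy
        · have hstep : pvStepMin my (some w) (px, py) = some w := by
            simp [pvStepMin, hpy, hlt]
          rw [hstep]
          have H := ih my (some w)
          cases hres : t.foldl (pvStepMin my) (some w) with
          | none => rw [hres] at H; simp at H
          | some v =>
            rw [hres] at H
            obtain ⟨hm, hle, hall⟩ := H
            have hvw : v ≤ w := hle w rfl
            refine ⟨?_, ?_, ?_⟩
            · rcases hm with h | h
              · have : v = w := by simpa using h.symm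
                exact Or.inl (by rw [this])
              · exact Or.inr (List.mem_cons_of_mem _ h)
            · intro w' hw'
              have : w = w' := by simpa using hw'
              omega
            · intro r hr hrmy
              rcases List.mem_cons.mp hr with h | h
              · subst h
                have : w ≤ px := by omega
                simp only
                omega
              · exact hall r h hrmy
    · -- the head does not match: accumulator unchanged
      have hstep : pvStepMin my acc (px, py) = acc := by simp [pvStepMin, hpy]
      rw [hstep]
      have H := ih my acc
      cases hres : t.foldl (pvStepMin my) acc with
      | none =>
        rw [hres] at H
        refine ⟨H.1, ?_⟩
        intro r hr
        rcases List.mem_cons.mp hr with h | h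
        · subst h; simpa using hpy
        · exact H.2 r h
      | some v =>
        rw [hres] at H
        obtain ⟨hm, hle, hall⟩ := H
        refine ⟨?_, hle, ?_⟩
        · rcases hm with h | h
          · exact Or.inl h
          · exact Or.inr (List.mem_cons_of_mem _ h)
        · intro r hr hrmy
          rcases List.mem_cons.mp hr with h | h
          · subst h; simp at hrmy; exact absurd hrmy hpy
          · exact hall r h hrmy

-- ===== VERDICT (by name: the statement is the Claim_ definition above) =====
theorem find_lowest_left_point_spec : Claim_equal_find_lowest_left_point := by
  intro points _
  unfold Spec_find_lowest_left_point
  cases points with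
  | nil => rfl
  | cons p t =>
    obtain ⟨q, hq, hqmem, hqb, hqall⟩ := foldA_props t p
    have hA : find_lowest_left_point (p :: t) = some q := by
      simpa [find_lowest_left_point, List.foldl_cons, pvStepA] using hq
    have hqmem' : q ∈ p :: t := by
      rcases hqmem with h | h
      · exact h ▸ List.mem_cons_self
      · exact List.mem_cons_of_mem _ h
    have hqall' : ∀ r ∈ p :: t, ¬ pvBeats r q := by
      intro r hr
      rcases List.mem_cons.mp hr with h | h
      · exact h ▸ hqb
      · exact hqall r h
    obtain ⟨my, hmy, hmyle, hmymem, hmyall⟩ := foldMax_props t p.2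
    have hBmax : (p :: t).foldl pvStepMax none = some my := by
      simpa [List.foldl_cons, pvStepMax] using hmy
    have hattained : ∃ r ∈ p :: t, r.2 = my := by
      rcases hmymem with h | ⟨r, hr, hr2⟩
      · exact ⟨p, List.mem_cons_self, h.symm⟩
      · exact ⟨r, List.mem_cons_of_mem _ hr, hr2⟩
    have hmyall' : ∀ r ∈ p :: t, r.2 ≤ my := by
      intro r hr
      rcases List.mem_cons.mp hr with h | h
      · exact h ▸ hmyle
      · exact hmyall r h
    have H := foldMin_props (p :: t) my none
    cases hres : (p :: t).foldl (pvStepMin my) none with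
    | none =>
      rw [hres] at H
      obtain ⟨-, hnone⟩ := H
      obtain ⟨r, hr, hr2⟩ := hattained
      exact absurd hr2 (hnone r hr)
    | some mx =>
      rw [hres] at H
      obtain ⟨hmxmem, -, hmxall⟩ := H
      have hmxmem' : (mx, my) ∈ p :: t := by
        rcases hmxmem with h | h
        · exact absurd h (by simp)
        · exact h
      have hB : find_lowest_left_point_alt (p :: t) = some (mx, my) := by
        simp [find_lowest_left_point_alt, hBmax, hres]
      rw [hA, hB]
      have h1 : ¬ pvBeats (mx, my) q := hqall' _ hmxmem'
      have h2 : q.2 ≤ my := hmyall' q hqmem'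
      obtain ⟨qx, qy⟩ := q
      simp only [pvBeats] at h1
      simp only at h1 h2
      have hqy : qy = my := by omega
      subst hqy
      have h4 : mx ≤ qx := hmxall (qx, qy) hqmem' rfl
      have : qx = mx := by omega
      subst this
      rfl
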